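-- pv_equiv track=rewrite | github.com/mbarnson/engrave | src/engrave/corpus/chunker.py | _extract_tail_bars
-- ===== SOURCE A (Python) =====
-- def _extract_tail_bars(ly_fragment: str, n_bars: int) -> str:
--     """Extract the last N bars from a LilyPond fragment.
--
--     Finds bar check positions and returns content from the Nth-to-last bar check
--     to the end of the fragment.
--
--     Args:
--         ly_fragment: LilyPond source fragment.
--         n_bars: Number of bars to extract from the tail.
--
--     Returns:
--         The tail portion of the fragment, or empty string if not enough bars.
--     """
--     # Find all bar check positions
--     bar_positions: list[int] = []
--     in_string = False
--     for i, ch in enumerate(ly_fragment):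
--         if ch == '"':
--             in_string = not in_string
--         elif ch == "|" and not in_string:
--             bar_positions.append(i)
--
--     if len(bar_positions) < n_bars:
--         return ""
--
--     # Get content from n_bars before the end
--     cut_pos = bar_positions[-(n_bars)]
--     return ly_fragment[cut_pos:].strip()
-- ===== SOURCE B (Python) =====
-- def _extract_tail_bars(ly_fragment: str, n_bars: int) -> str:
--     """Split-based rewrite: split on '"' (even pieces are unquoted), split each
--     unquoted piece on '|', and reconstruct absolute bar positions from piece
--     lengths; C-level str.split replaces the per-character Python scan."""
--     bar_positions: list[int] = []
--     offset = 0
--     unquoted = True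
--     for piece in ly_fragment.split('"'):
--         if unquoted:
--             pos = offset
--             parts = piece.split("|")
--             for part in parts[:-1]:
--                 pos += len(part)
--                 bar_positions.append(pos)
--                 pos += 1
--         offset += len(piece) + 1
--         unquoted = not unquoted
--
--     if len(bar_positions) < n_bars:
--         return ""
--
--     cut_pos = bar_positions[-(n_bars)]
--     return ly_fragment[cut_pos:].strip()
-- ===== Notes on version B (the rewrite author's own statement) =====
-- stated objective: faster
-- what changed: Replaces A's per-character scan with a toggling in_string flag by a split-based pass: split the fragment on '"' (the unquoted content is exactly every other piece), split each unquoted piece on '|', and reconstruct the absolute bar positions from piece lengths; the tail extraction logic is unchanged.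
import Mathlib
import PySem

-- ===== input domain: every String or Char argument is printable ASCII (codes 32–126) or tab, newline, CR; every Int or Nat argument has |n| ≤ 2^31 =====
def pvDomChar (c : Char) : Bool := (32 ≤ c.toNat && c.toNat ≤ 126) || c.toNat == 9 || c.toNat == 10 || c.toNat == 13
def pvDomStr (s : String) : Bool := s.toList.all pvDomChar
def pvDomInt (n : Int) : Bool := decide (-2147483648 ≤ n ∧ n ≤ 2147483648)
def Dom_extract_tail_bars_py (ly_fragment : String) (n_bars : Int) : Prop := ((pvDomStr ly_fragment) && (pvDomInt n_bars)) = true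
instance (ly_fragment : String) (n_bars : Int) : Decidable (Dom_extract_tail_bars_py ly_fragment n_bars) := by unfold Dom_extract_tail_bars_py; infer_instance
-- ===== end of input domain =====

-- B replaces A's per-character scan (in_string toggle) by splitting on '"' and '|' and
-- reconstructing absolute bar positions from piece lengths (measurably faster in Python:
-- C-level str.split replaces the per-character Python loop); the tail logic is unchanged.

-- ===== PORT A =====
def extract_tail_bars_py (ly_fragment : String) (n_bars : Int) : String :=
  let st := (PySem.List.enumerate ly_fragment.toList).foldl
    (fun (acc : List Int × Bool) (p : Int × Char) =>
      if p.2 = '"' then (acc.1, !acc.2)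
      else if p.2 = '|' ∧ acc.2 = false then (acc.1 ++ [p.1], acc.2)
      else acc) ([], false)
  let bar_positions := st.1
  if (bar_positions.length : Int) < n_bars then ""
  else
    -- Python raises IndexError when the index is out of range; Pre_ excludes that case
    let cut_pos := (PySem.List.pyGet? bar_positions (-n_bars)).getD 0
    PySem.Str.strip (PySem.Str.slice ly_fragment (some cut_pos) none)

-- ===== PORT B =====
def extract_tail_bars_py_alt (ly_fragment : String) (n_bars : Int) : String :=
  let st := (PySem.Chars.splitOn ly_fragment.toList ['"']).foldl
    (fun (st : List Int × Int × Bool) (piece : List Char) =>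
      let bp :=
        if st.2.2 then
          ((PySem.List.slice (PySem.Chars.splitOn piece ['|']) none (some (-1))).foldl
            (fun (q : List Int × Int) (part : List Char) =>
              (q.1 ++ [q.2 + (part.length : Int)], q.2 + (part.length : Int) + 1))
            (st.1, st.2.1)).1
        else st.1
      (bp, st.2.1 + (piece.length : Int) + 1, !st.2.2))
    ([], 0, true)
  let bar_positions := st.1
  if (bar_positions.length : Int) < n_bars then ""
  else
    let cut_pos := (PySem.List.pyGet? bar_positions (-n_bars)).getD 0
    PySem.Str.strip (PySem.Str.slice ly_fragment (some cut_pos) none)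

-- ===== PRECONDITION & SPEC =====
-- Pre_ excludes exactly the inputs on which A raises IndexError: n_bars ≤ 0 while the
-- number of unquoted '|' characters is at most -n_bars (then bar_positions[-n_bars] is
-- out of range).  B raises there too; nothing is excluded on which A returns.
def Pre_extract_tail_bars_py (ly_fragment : String) (n_bars : Int) : Prop :=
  1 ≤ n_bars ∨
    -n_bars < (((List.range ly_fragment.toList.length).countP
      (fun i => ly_fragment.toList.getD i ' ' = '|' ∧ (ly_fragment.toList.take i).count '"' % 2 = 0) : Nat) : Int)
instance (ly_fragment : String) (n_bars : Int) : Decidable (Pre_extract_tail_bars_py ly_fragment n_bars) := by unfold Pre_extract_tail_bars_py; infer_instance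

def pvWitness_extract_tail_bars_py : String × Int := ("a | b \"x|y\" c | d", 2)

def Spec_extract_tail_bars_py (ly_fragment : String) (n_bars : Int) (out : String) : Prop := out = extract_tail_bars_py_alt ly_fragment n_bars
instance (ly_fragment : String) (n_bars : Int) (out : String) : Decidable (Spec_extract_tail_bars_py ly_fragment n_bars out) := by unfold Spec_extract_tail_bars_py; infer_instance

-- ===== CLAIM (what is proved, stated in full; the proofs are below) =====
def Claim_equal_extract_tail_bars_py : Prop := ∀ (ly_fragment : String) (n_bars : Int), Dom_extract_tail_bars_py ly_fragment n_bars → Pre_extract_tail_bars_py ly_fragment n_bars → Spec_extract_tail_bars_py ly_fragment n_bars (extract_tail_bars_py ly_fragment n_bars)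

-- ===== LEMMAS AND PROOFS =====

/-- Splitting a character list on a single separator character (reference shape). -/
def pvSplitChar (d : Char) : List Char → List (List Char)
  | [] => [[]]
  | c :: l => if c = d then [] :: pvSplitChar d l else (pvSplitChar d l).modifyHead (c :: ·)

/-- The bar-check positions A collects: index of every '|' outside quotes. -/
def pvBars : List Char → Int → Bool → List Int
  | [], _, _ => []
  | c :: l, i, ins =>
    if c = '"' then pvBars l (i + 1) (!ins)
    else if c = '|' ∧ ins = false then i :: pvBars l (i + 1) ins
    else pvBars l (i + 1) ins

/-- Rejoin pieces with the separator character. -/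
def pvJoin (d : Char) : List (List Char) → List Char
  | [] => []
  | [p] => p
  | p :: ps => p ++ d :: pvJoin d ps

theorem pvSplitChar_ne_nil (d : Char) (l : List Char) : pvSplitChar d l ≠ [] := by
  induction l with
  | nil => simp [pvSplitChar]
  | cons c l ih =>
    simp only [pvSplitChar]
    split
    · simp
    · cases h : pvSplitChar d l with
      | nil => exact absurd h ih
      | cons a t => simp [List.modifyHead]

theorem pvGo_spec (d : Char) : ∀ (l : List Char) (fuel : Nat), l.length ≤ fuel →
    ∀ (cur : List Char) (acc : List (List Char)),
    PySem.Chars.splitOn.go [d] fuel l cur acc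
      = acc.reverse ++ (pvSplitChar d l).modifyHead (cur.reverse ++ ·) := by
  intro l
  induction l with
  | nil =>
    intro fuel _ cur acc
    cases fuel <;> simp [PySem.Chars.splitOn.go, pvSplitChar, List.modifyHead]
  | cons c l ih =>
    intro fuel hf cur acc
    cases fuel with
    | zero => simp at hf
    | succ f =>
      have hpre : List.isPrefixOf [d] (c :: l) = (d == c) := by
        simp [List.isPrefixOf]
      by_cases hc : c = d
      · subst hc
        rw [PySem.Chars.splitOn.go]
        simp only [hpre, beq_self_eq_true, if_pos, List.length_cons, List.length_nil,
          List.drop_succ_cons, List.drop_zero]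
        rw [ih f (by simpa using hf) [] (cur.reverse :: acc)]
        simp only [pvSplitChar, List.modifyHead, List.reverse_nil,
          List.nil_append, List.reverse_cons, List.append_assoc, List.singleton_append]
        cases hs : pvSplitChar c l <;> simp
      · rw [PySem.Chars.splitOn.go]
        have : (d == c) = false := by simp [Ne.symm hc]
        simp only [hpre, this, Bool.false_eq_true, if_neg, not_false_eq_true]
        rw [ih f (by simpa using hf) (c :: cur) acc]
        simp only [pvSplitChar, if_neg hc]
        cases h : pvSplitChar d l with
        | nil => exact absurd h (pvSplitChar_ne_nil _ l)
        | cons a t => simp [List.modifyHead]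

theorem pvSplitOn_eq (d : Char) (l : List Char) :
    PySem.Chars.splitOn l [d] = pvSplitChar d l := by
  rw [PySem.Chars.splitOn, pvGo_spec d l (l.length + 1) (by omega) [] []]
  cases h : pvSplitChar d l with
  | nil => exact absurd h (pvSplitChar_ne_nil _ l)
  | cons a t => simp [List.modifyHead]

theorem pvJoin_splitChar (d : Char) (l : List Char) : pvJoin d (pvSplitChar d l) = l := by
  induction l with
  | nil => simp [pvSplitChar, pvJoin]
  | cons c l ih =>
    simp only [pvSplitChar]
    by_cases hc : c = d
    · subst hc
      rw [if_pos rfl]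
      cases h : pvSplitChar c l with
      | nil => exact absurd h (pvSplitChar_ne_nil _ l)
      | cons a t =>
        rw [h] at ih
        cases t <;> simpa [pvJoin] using ih
    · rw [if_neg hc]
      cases h : pvSplitChar d l with
      | nil => exact absurd h (pvSplitChar_ne_nil _ l)
      | cons a t =>
        rw [h] at ih
        cases t <;> simpa [pvJoin, List.modifyHead] using ih

theorem pvSplitChar_no_d (d : Char) (l : List Char) : ∀ p ∈ pvSplitChar d l, d ∉ p := by
  induction l with
  | nil => simp [pvSplitChar]
  | cons c l ih =>
    simp only [pvSplitChar]
    by_cases hc : c = d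
    · subst hc
      rw [if_pos rfl]
      intro p hp
      rcases List.mem_cons.1 hp with h | h
      · simp [h]
      · exact ih p h
    · rw [if_neg hc]
      cases h : pvSplitChar d l with
      | nil => exact absurd h (pvSplitChar_ne_nil _ l)
      | cons a t =>
        rw [h] at ih
        intro p hp
        rcases List.mem_cons.1 (by simpa [List.modifyHead] using hp) with h' | h'
        · subst h'
          intro hmem
          rcases List.mem_cons.1 hmem with h'' | h''
          · exact hc h''.symm
          · exact ih a (List.mem_cons_self) h''
        · exact ih p (List.mem_cons_of_mem a h')

theorem pvBars_append (p q : List Char) (off : Int) (ins : Bool) (h : '"' ∉ p) :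
    pvBars (p ++ q) off ins = pvBars p off ins ++ pvBars q (off + p.length) ins := by
  induction p generalizing off with
  | nil => simp [pvBars]
  | cons c p ih =>
    have hc : c ≠ '"' := fun hc => h (by simp [hc])
    have hp : '"' ∉ p := fun hp => h (by simp [hp])
    simp only [List.cons_append, pvBars, if_neg hc]
    have harith : off + 1 + (p.length : Int) = off + ((p.length : Int) + 1) := by ring
    by_cases hb : c = '|' ∧ ins = false
    · rw [if_pos hb, if_pos hb, ih (off + 1) hp]
      simp [harith]
    · rw [if_neg hb, if_neg hb, ih (off + 1) hp]
      simp [harith]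

theorem pvBars_true_nil (p : List Char) (off : Int) (h : '"' ∉ p) :
    pvBars p off true = [] := by
  induction p generalizing off with
  | nil => simp [pvBars]
  | cons c p ih =>
    have hc : c ≠ '"' := fun hc => h (by simp [hc])
    have hp : '"' ∉ p := fun hp => h (by simp [hp])
    simp only [pvBars, if_neg hc]
    rw [if_neg (by simp), ih (off + 1) hp]

theorem pvInner (p : List Char) (hq : '"' ∉ p) : ∀ (acc : List Int) (off : Int),
    (((pvSplitChar '|' p).dropLast).foldl
      (fun (q : List Int × Int) (part : List Char) =>
        (q.1 ++ [q.2 + (part.length : Int)], q.2 + (part.length : Int) + 1))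
      (acc, off)).1 = acc ++ pvBars p off false := by
  induction p with
  | nil => intro acc off; simp [pvSplitChar, pvBars]
  | cons c p ih =>
    intro acc off
    have hc : c ≠ '"' := fun hc => hq (by simp [hc])
    have hp : '"' ∉ p := fun hp => hq (by simp [hp])
    by_cases hb : c = '|'
    · subst hb
      rw [show pvSplitChar '|' ('|' :: p) = [] :: pvSplitChar '|' p from by
        simp [pvSplitChar]]
      cases h : pvSplitChar '|' p with
      | nil => exact absurd h (pvSplitChar_ne_nil _ p)
      | cons a t =>
        rw [← h]
        have hd : (([] : List Char) :: pvSplitChar '|' p).dropLast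
            = ([] : List Char) :: (pvSplitChar '|' p).dropLast := by
          rw [h]; simp [List.dropLast]
        rw [hd]
        simp only [List.foldl_cons, List.length_nil, Nat.cast_zero, add_zero]
        rw [ih hp (acc ++ [off]) (off + 1)]
        simp [pvBars, List.append_assoc]
    · simp only [pvSplitChar, if_neg hb]
      cases h : pvSplitChar '|' p with
      | nil => exact absurd h (pvSplitChar_ne_nil _ p)
      | cons a t =>
        have hbars : pvBars (c :: p) off false = pvBars p (off + 1) false := by
          simp [pvBars, hc, hb]
        cases t with
        | nil =>
          simp only [List.modifyHead, List.dropLast_singleton, List.foldl_nil]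
          rw [hbars]
          have := ih hp acc (off + 1)
          rw [h] at this
          simpa using this
        | cons b t =>
          simp only [List.modifyHead]
          rw [hbars]
          have hstep : ((c :: a) :: b :: t).dropLast.foldl
              (fun (q : List Int × Int) (part : List Char) =>
                (q.1 ++ [q.2 + (part.length : Int)], q.2 + (part.length : Int) + 1))
              (acc, off)
            = (b :: t).dropLast.foldl
              (fun (q : List Int × Int) (part : List Char) =>
                (q.1 ++ [q.2 + (part.length : Int)], q.2 + (part.length : Int) + 1))
              (acc ++ [off + ((a.length : Int) + 1)], off + ((a.length : Int) + 1) + 1) := by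
            simp only [List.dropLast_cons₂, List.foldl_cons, List.length_cons]
            push_cast
            ring_nf
          rw [hstep]
          have := ih hp acc (off + 1)
          rw [h] at this
          have hstep' : ((a :: b :: t).dropLast).foldl
              (fun (q : List Int × Int) (part : List Char) =>
                (q.1 ++ [q.2 + (part.length : Int)], q.2 + (part.length : Int) + 1))
              (acc, off + 1)
            = (b :: t).dropLast.foldl
              (fun (q : List Int × Int) (part : List Char) =>
                (q.1 ++ [q.2 + (part.length : Int)], q.2 + (part.length : Int) + 1))
              (acc ++ [off + ((a.length : Int) + 1)], off + ((a.length : Int) + 1) + 1) := by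
            simp only [List.dropLast_cons₂, List.foldl_cons]
            ring_nf
          rw [hstep'] at this
          exact this

theorem pvOuter : ∀ (pieces : List (List Char)), (∀ p ∈ pieces, '"' ∉ p) →
    ∀ (acc : List Int) (off : Int) (unq : Bool),
    ((pieces.foldl
      (fun (st : List Int × Int × Bool) (piece : List Char) =>
        (if st.2.2 then
            ((PySem.List.slice (PySem.Chars.splitOn piece ['|']) none (some (-1))).foldl
              (fun (q : List Int × Int) (part : List Char) =>
                (q.1 ++ [q.2 + (part.length : Int)], q.2 + (part.length : Int) + 1))
              (st.1, st.2.1)).1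
          else st.1,
          st.2.1 + (piece.length : Int) + 1, !st.2.2))
      (acc, off, unq)).1) = acc ++ pvBars (pvJoin '"' pieces) off (!unq) := by
  intro pieces
  induction pieces with
  | nil => intro _ acc off unq; simp [pvJoin, pvBars]
  | cons p ps ih =>
    intro hq acc off unq
    have hqp : '"' ∉ p := hq p List.mem_cons_self
    have hqs : ∀ r ∈ ps, '"' ∉ r := fun r hr => hq r (List.mem_cons_of_mem p hr)
    have hslice : PySem.List.slice (PySem.Chars.splitOn p ['|']) none (some (-1))
        = (pvSplitChar '|' p).dropLast := by
      rw [pvSplitOn_eq]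
      simp [pysem]
    rw [List.foldl_cons]
    cases unq with
    | true =>
      rw [ih hqs]
      simp only [Bool.not_true, Bool.not_false, if_true]
      rw [hslice, pvInner p hqp acc off]
      cases ps with
      | nil => simp [pvJoin, pvBars]
      | cons r rs =>
        have hjoin : pvJoin '"' (p :: r :: rs) = p ++ '"' :: pvJoin '"' (r :: rs) := by
          simp [pvJoin]
        rw [hjoin, pvBars_append p _ off false hqp]
        simp [pvBars, List.append_assoc]
    | false =>
      rw [ih hqs]
      simp only [Bool.not_true, Bool.not_false, Bool.false_eq_true, if_false]
      cases ps with
      | nil =>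
        simp [pvJoin, pvBars, pvBars_true_nil p off hqp]
      | cons r rs =>
        have hjoin : pvJoin '"' (p :: r :: rs) = p ++ '"' :: pvJoin '"' (r :: rs) := by
          simp [pvJoin]
        rw [hjoin, pvBars_append p _ off true hqp, pvBars_true_nil p off hqp]
        simp [pvBars]

theorem pvScanA : ∀ (cs : List Char) (i : Int) (acc : List Int) (ins : Bool),
    ((PySem.List.enumerate cs i).foldl
      (fun (acc : List Int × Bool) (p : Int × Char) =>
        if p.2 = '"' then (acc.1, !acc.2)
        else if p.2 = '|' ∧ acc.2 = false then (acc.1 ++ [p.1], acc.2)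
        else acc) (acc, ins)).1 = acc ++ pvBars cs i ins := by
  intro cs
  induction cs with
  | nil => intro i acc ins; simp [PySem.List.enumerate, pvBars]
  | cons c l ih =>
    intro i acc ins
    simp only [PySem.List.enumerate, List.foldl_cons]
    by_cases hc : c = '"'
    · subst hc
      simp only [↓reduceIte]
      rw [ih (i + 1) acc (!ins)]
      simp [pvBars]
    · simp only [if_neg hc]
      by_cases hb : c = '|' ∧ ins = false
      · simp only [if_pos hb]
        rw [ih (i + 1) (acc ++ [i]) ins]
        simp [pvBars, if_neg hc, if_pos hb, List.append_assoc]
      · simp only [if_neg hb]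
        rw [ih (i + 1) acc ins]
        simp [pvBars, if_neg hc, if_neg hb]

-- ===== VERDICT (by name: the statement is the Claim_ definition above) =====
theorem extract_tail_bars_py_spec : Claim_equal_extract_tail_bars_py := by
  intro ly n _ _
  unfold Spec_extract_tail_bars_py extract_tail_bars_py extract_tail_bars_py_alt
  have hA := pvScanA ly.toList 0 [] false
  have hB := pvOuter (pvSplitChar '"' ly.toList)
    (pvSplitChar_no_d '"' ly.toList) [] 0 true
  rw [pvJoin_splitChar] at hB
  simp only [List.nil_append, Bool.not_true] at hA hB
  rw [pvSplitOn_eq '"' ly.toList]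
  simp only [hA, hB]
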